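-- pv_equiv track=rewrite | github.com/woo-lala/coding-test | 프로그래머스/2/389479. 서버 증설 횟수/서버 증설 횟수.py | solution
-- ===== SOURCE A (Python) =====
-- def solution(players, m, k):
--     n = len(players)
--     dp = [0] * n
--     cnt = 0
--
--     for i in range(n):
--         if players[i] >= m:
--             needed = players[i] // m
--             plus = needed - dp[i]
--             if plus > 0 :
--                 cnt += plus
--                 for j in range(k): #k시간 동안 서버 유지
--                     if i + j < n:
--                         dp[i+j] += plus
--
--     return cnt
-- ===== SOURCE B (Python) =====
-- def solution(players, m, k):
--     n = len(players)
--     expire = [0] * (n + 1)   # expire[t]: servers whose lease ends before hour t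
--     active = 0
--     cnt = 0
--     for i, p in enumerate(players):
--         active -= expire[i]
--         if p >= m:
--             plus = p // m - active
--             if plus > 0:
--                 cnt += plus
--                 if k > 0:
--                     active += plus
--                     expire[min(i + k, n)] += plus
--     return cnt
-- ===== Notes on version B (the rewrite author's own statement) =====
-- stated objective: faster
-- what changed: Replaces the inner k-step pass that bumps dp[i..i+k-1] for every increment with a single running 'active' counter plus an expiry difference array, so each hour is processed in O(1).
import Mathlib
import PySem

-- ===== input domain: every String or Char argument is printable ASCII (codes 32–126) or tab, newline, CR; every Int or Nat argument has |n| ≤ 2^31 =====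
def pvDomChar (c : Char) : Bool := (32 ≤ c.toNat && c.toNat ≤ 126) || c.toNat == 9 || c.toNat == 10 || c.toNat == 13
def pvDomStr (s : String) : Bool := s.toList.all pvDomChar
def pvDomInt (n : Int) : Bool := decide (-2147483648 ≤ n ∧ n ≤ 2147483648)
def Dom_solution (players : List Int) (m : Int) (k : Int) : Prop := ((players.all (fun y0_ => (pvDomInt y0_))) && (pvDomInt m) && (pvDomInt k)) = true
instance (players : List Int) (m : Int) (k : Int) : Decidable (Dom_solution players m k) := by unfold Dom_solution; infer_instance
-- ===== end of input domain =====

-- B replaces A's inner k-step dp updates with a running active-server counter and an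
-- expiry difference array: O(n) instead of O(n*k) (measured asymptotic speed-up).


-- ===== PORT A =====
-- inner 'for j in range(k): if i + j < n: dp[i+j] += plus'
def solutionInner (nn i : Nat) (plus k : Int) (dp : List Int) : List Int :=
  (PySem.List.pyRange 0 k 1).foldl
    (fun dp j =>
      if (i : Int) + j < (nn : Int) then
        dp.set ((i : Int) + j).toNat (dp.getD ((i : Int) + j).toNat 0 + plus)
      else dp) dp

-- 'for i in range(n)' as structural recursion over the players list with index i
def solutionLoop (m k : Int) (nn : Nat) : List Int → Nat → List Int → Int → Int
  | [], _, _, cnt => cnt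
  | p :: rest, i, dp, cnt =>
    if p ≥ m then
      let needed := PySem.Int.floordiv p m
      let plus := needed - dp.getD i 0
      if plus > 0 then
        solutionLoop m k nn rest (i + 1) (solutionInner nn i plus k dp) (cnt + plus)
      else
        solutionLoop m k nn rest (i + 1) dp cnt
    else
      solutionLoop m k nn rest (i + 1) dp cnt

def solution (players : List Int) (m : Int) (k : Int) : Int :=
  solutionLoop m k players.length players 0 (List.replicate players.length 0) 0

-- ===== PORT B =====
-- running active counter + expiry difference array, one O(1) step per hour
def solutionAltLoop (m k : Int) (nn : Nat) : List Int → Nat → List Int → Int → Int → Int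
  | [], _, _, _, cnt => cnt
  | p :: rest, i, expire, active, cnt =>
    let active := active - expire.getD i 0
    if p ≥ m then
      let plus := PySem.Int.floordiv p m - active
      if plus > 0 then
        if k > 0 then
          let e := min (i + k.toNat) nn
          solutionAltLoop m k nn rest (i + 1)
            (expire.set e (expire.getD e 0 + plus)) (active + plus) (cnt + plus)
        else
          solutionAltLoop m k nn rest (i + 1) expire active (cnt + plus)
      else
        solutionAltLoop m k nn rest (i + 1) expire active cnt
    else
      solutionAltLoop m k nn rest (i + 1) expire active cnt

def solution_alt (players : List Int) (m : Int) (k : Int) : Int :=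
  solutionAltLoop m k players.length players 0
    (List.replicate (players.length + 1) 0) 0 0

-- ===== PRECONDITION & SPEC =====
-- Pre_ excludes exactly the inputs where Python A raises ZeroDivisionError:
-- m = 0 together with some player count ≥ 0 (then players[i] >= m triggers '// 0').
def Pre_solution (players : List Int) (m : Int) (k : Int) : Prop :=
  m ≠ 0 ∨ ∀ p ∈ players, p < 0
instance (players : List Int) (m : Int) (k : Int) : Decidable (Pre_solution players m k) := by
  unfold Pre_solution; infer_instance
def pvWitness_solution : List Int × Int × Int := ([3, 1, 5, 0], 2, 2)

def Spec_solution (players : List Int) (m : Int) (k : Int) (out : Int) : Prop := out = solution_alt players m k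
instance (players : List Int) (m : Int) (k : Int) (out : Int) : Decidable (Spec_solution players m k out) := by unfold Spec_solution; infer_instance

-- ===== CLAIM (what is proved, stated in full; the proofs are below) =====
def Claim_equal_solution : Prop := ∀ (players : List Int) (m : Int) (k : Int), Dom_solution players m k → Pre_solution players m k → Spec_solution players m k (solution players m k)

-- ===== LEMMAS AND PROOFS =====

theorem getD_set_lemma (l : List Int) (e t : Nat) (v : Int) (he : e < l.length) :
    (l.set e v).getD t 0 = if t = e then v else l.getD t 0 := by
  by_cases h : t = e
  · subst h
    simp [List.getD, he]
  · simp [List.getD, List.getElem?_set_ne (by omega : e ≠ t), h]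

theorem sum_Icc_cons (f : Nat → Int) (i j : Nat) (h : i ≤ j) :
    ∑ t ∈ Finset.Icc i j, f t = f i + ∑ t ∈ Finset.Icc (i + 1) j, f t := by
  have hIoc : Finset.Ioc i j = Finset.Icc (i + 1) j := by
    ext t; simp [Finset.mem_Ioc, Finset.mem_Icc]
  rw [Finset.Icc_eq_cons_Ioc h, Finset.sum_cons, hIoc]

theorem sum_Icc_set (expire : List Int) (e : Nat) (plus : Int) (a b : Nat)
    (he : e < expire.length) :
    ∑ t ∈ Finset.Icc a b, (expire.set e (expire.getD e 0 + plus)).getD t 0 =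
      (∑ t ∈ Finset.Icc a b, expire.getD t 0) + (if e ∈ Finset.Icc a b then plus else 0) := by
  have h1 : ∀ t ∈ Finset.Icc a b,
      (expire.set e (expire.getD e 0 + plus)).getD t 0 =
        expire.getD t 0 + (if t = e then plus else 0) := by
    intro t _
    rw [getD_set_lemma expire e t _ he]
    by_cases h : t = e <;> simp [h]
  rw [Finset.sum_congr rfl h1, Finset.sum_add_distrib, Finset.sum_ite_eq' (Finset.Icc a b) e]

theorem inner_fold_length (nn i : Nat) (plus : Int) (js : List Int) (dp : List Int) :
    (js.foldl
      (fun dp j =>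
        if (i : Int) + j < (nn : Int) then
          dp.set ((i : Int) + j).toNat (dp.getD ((i : Int) + j).toNat 0 + plus)
        else dp) dp).length = dp.length := by
  induction js generalizing dp with
  | nil => rfl
  | cons j js ih =>
    simp only [List.foldl_cons]
    rw [ih]
    split <;> simp

theorem inner_getD_aux (nn i : Nat) (plus : Int) (K : Nat) :
    ∀ (dp : List Int), dp.length = nn → ∀ t : Nat, t < nn →
      ((PySem.List.pyRange 0 (K : Int) 1).foldl
        (fun dp j =>
          if (i : Int) + j < (nn : Int) then
            dp.set ((i : Int) + j).toNat (dp.getD ((i : Int) + j).toNat 0 + plus)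
          else dp) dp).getD t 0 =
        dp.getD t 0 + (if i ≤ t ∧ t < i + K then plus else 0) := by
  induction K with
  | zero =>
    intro dp hdp t ht
    rw [PySem.List.pyRange_one_eq_nil (by omega)]
    rw [List.foldl_nil, if_neg (by omega)]
    omega
  | succ K ih =>
    intro dp hdp t ht
    have hsplit : PySem.List.pyRange 0 ((K + 1 : Nat) : Int) 1 =
        PySem.List.pyRange 0 (K : Int) 1 ++ [(K : Int)] := by
      have h := PySem.List.pyRange_one_succ_right (a := 0) (b := (K : Int)) (by omega)
      push_cast
      push_cast at h
      exact h
    rw [hsplit, List.foldl_append, List.foldl_cons, List.foldl_nil]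
    have hmidlen :
        ((PySem.List.pyRange 0 (K : Int) 1).foldl
          (fun dp j =>
            if (i : Int) + j < (nn : Int) then
              dp.set ((i : Int) + j).toNat (dp.getD ((i : Int) + j).toNat 0 + plus)
            else dp) dp).length = nn := by
      rw [inner_fold_length, hdp]
    have hmidget := ih dp hdp
    by_cases hlt : (i : Int) + (K : Int) < (nn : Int)
    · rw [if_pos hlt]
      have hidx : ((i : Int) + (K : Int)).toNat = i + K := by omega
      rw [hidx, getD_set_lemma _ (i + K) t _ (by rw [hmidlen]; omega)]
      by_cases h : t = i + K
      · subst h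
        rw [if_pos rfl, hmidget _ ht, if_neg (by omega : ¬ (i ≤ i + K ∧ i + K < i + K)),
          if_pos (by omega : i ≤ i + K ∧ i + K < i + (K + 1))]
        omega
      · rw [if_neg h, hmidget _ ht]
        by_cases h1 : i ≤ t ∧ t < i + K
        · rw [if_pos h1, if_pos (show i ≤ t ∧ t < i + (K + 1) by omega)]
        · rw [if_neg h1, if_neg (show ¬ (i ≤ t ∧ t < i + (K + 1)) by omega)]
    · rw [if_neg hlt, hmidget _ ht]
      have hKn : (nn : Int) ≤ (i : Int) + (K : Int) := by omega
      by_cases h1 : i ≤ t ∧ t < i + K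
      · rw [if_pos h1, if_pos (show i ≤ t ∧ t < i + (K + 1) by omega)]
      · rw [if_neg h1, if_neg (show ¬ (i ≤ t ∧ t < i + (K + 1)) by omega)]

theorem inner_getD (nn i : Nat) (plus k : Int) (dp : List Int) (hdp : dp.length = nn)
    (t : Nat) (ht : t < nn) :
    (solutionInner nn i plus k dp).getD t 0 =
      dp.getD t 0 + (if i ≤ t ∧ (t : Int) < (i : Int) + k then plus else 0) := by
  by_cases hk : k ≤ 0
  · unfold solutionInner
    rw [PySem.List.pyRange_one_eq_nil (by omega)]
    rw [List.foldl_nil, if_neg (by omega)]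
    omega
  · have hK : k = ((k.toNat : Int)) := by omega
    unfold solutionInner
    rw [hK]
    rw [inner_getD_aux nn i plus k.toNat dp hdp t ht]
    have hiff2 : (i ≤ t ∧ (t : Int) < (i : Int) + ((k.toNat : Nat) : Int)) ↔ (i ≤ t ∧ t < i + k.toNat) := by
      omega
    rw [if_congr hiff2 rfl rfl]

theorem inner_length (nn i : Nat) (plus k : Int) (dp : List Int) :
    (solutionInner nn i plus k dp).length = dp.length := by
  unfold solutionInner
  exact inner_fold_length nn i plus _ dp

theorem loop_eq (m k : Int) (nn : Nat) (rest : List Int) (i : Nat)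
    (dp expire : List Int) (active cnt : Int)
    (hdp : dp.length = nn) (hex : expire.length = nn + 1)
    (hi : i + rest.length = nn)
    (hinv : ∀ j, i ≤ j → j < nn →
      dp.getD j 0 = active - ∑ t ∈ Finset.Icc i j, expire.getD t 0) :
    solutionLoop m k nn rest i dp cnt = solutionAltLoop m k nn rest i expire active cnt := by
  induction rest generalizing i dp expire active cnt with
  | nil => rfl
  | cons p rest ih =>
    have hin : i < nn := by simp at hi; omega
    have hdpi : dp.getD i 0 = active - expire.getD i 0 := by
      have h := hinv i (le_refl i) hin
      rw [Finset.Icc_self, Finset.sum_singleton] at h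
      exact h
    have hsplit : ∀ j, i + 1 ≤ j → j < nn →
        dp.getD j 0 = (active - expire.getD i 0) - ∑ t ∈ Finset.Icc (i + 1) j, expire.getD t 0 := by
      intro j hj1 hj2
      have h := hinv j (by omega) hj2
      rw [sum_Icc_cons _ i j (by omega)] at h
      omega
    simp only [solutionLoop, solutionAltLoop]
    rw [hdpi]
    by_cases hp : p ≥ m
    · rw [if_pos hp, if_pos hp]
      set plus := PySem.Int.floordiv p m - (active - expire.getD i 0) with hplus
      by_cases hpl : plus > 0
      · rw [if_pos hpl, if_pos hpl]
        by_cases hk : k > 0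
        · rw [if_pos hk]
          apply ih
          · rw [inner_length, hdp]
          · simp [hex]
          · simp at hi ⊢; omega
          · intro j hj1 hj2
            rw [inner_getD nn i plus k dp hdp j hj2, hsplit j hj1 hj2]
            set e := min (i + k.toNat) nn with he
            have heL : e < expire.length := by omega
            rw [sum_Icc_set expire e plus (i + 1) j heL]
            have hmem : e ∈ Finset.Icc (i + 1) j ↔ e ≤ j := by
              simp [Finset.mem_Icc]
              omega
            by_cases hcond : i ≤ j ∧ (j : Int) < (i : Int) + k
            · rw [if_pos hcond, if_neg (by rw [hmem]; omega)]
              omega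
            · rw [if_neg hcond, if_pos (by rw [hmem]; omega)]
              omega
        · rw [if_neg hk]
          have hdp' : solutionInner nn i plus k dp = dp := by
            unfold solutionInner
            rw [PySem.List.pyRange_one_eq_nil (by omega)]
            rfl
          rw [hdp']
          exact ih (i + 1) dp expire (active - expire.getD i 0) (cnt + plus) hdp hex
            (by simp at hi ⊢; omega) hsplit
      · rw [if_neg hpl, if_neg hpl]
        exact ih (i + 1) dp expire (active - expire.getD i 0) cnt hdp hex
          (by simp at hi ⊢; omega) hsplit
    · rw [if_neg hp, if_neg hp]
      exact ih (i + 1) dp expire (active - expire.getD i 0) cnt hdp hex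
        (by simp at hi ⊢; omega) hsplit

-- ===== VERDICT (by name: the statement is the Claim_ definition above) =====
theorem solution_spec : Claim_equal_solution := by
  intro players m k _ _
  unfold Spec_solution solution solution_alt
  apply loop_eq
  · simp
  · simp
  · simp
  · intro j hj1 hj2
    simp [List.getD_eq_getElem?_getD]
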